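-- pv_equiv track=rewrite | github.com/Diogo-Serra/42_School | python_modules/module03/ex4/ft_inventory_system.py | get_least_abundant
-- ===== SOURCE A (Python) =====
-- def get_least_abundant(inventory: dict[str, int]) -> tuple[str, int]:
--     first_item = list(inventory.keys())[0]
--     least_name = first_item
--     least_quantity = inventory[first_item]
--
--     for item_name in inventory:
--         if inventory[item_name] < least_quantity:
--             least_name = item_name
--             least_quantity = inventory[item_name]
--     return least_name, least_quantity
-- ===== SOURCE B (Python) =====
-- def get_least_abundant(inventory: dict[str, int]) -> tuple[str, int]:
--     # Stable sort keeps insertion order among equal quantities, so [0] is the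
--     # first-inserted minimal item, matching the strict-< first-wins scan.
--     return sorted(inventory.items(), key=lambda kv: kv[1])[0]
-- ===== Notes on version B (the rewrite author's own statement) =====
-- stated objective: simpler
-- what changed: Replaces the manual first-key seed plus strict-< min scan over dict keys with a one-line stable sort of items() by quantity followed by picking the first element; stability preserves A's first-wins tie-break and the trailing [0] raises IndexError on an empty dict exactly like A.
-- outside the precondition, e.g. on get_least_abundant({}): A raises IndexError, B raises IndexError
import Mathlib
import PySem

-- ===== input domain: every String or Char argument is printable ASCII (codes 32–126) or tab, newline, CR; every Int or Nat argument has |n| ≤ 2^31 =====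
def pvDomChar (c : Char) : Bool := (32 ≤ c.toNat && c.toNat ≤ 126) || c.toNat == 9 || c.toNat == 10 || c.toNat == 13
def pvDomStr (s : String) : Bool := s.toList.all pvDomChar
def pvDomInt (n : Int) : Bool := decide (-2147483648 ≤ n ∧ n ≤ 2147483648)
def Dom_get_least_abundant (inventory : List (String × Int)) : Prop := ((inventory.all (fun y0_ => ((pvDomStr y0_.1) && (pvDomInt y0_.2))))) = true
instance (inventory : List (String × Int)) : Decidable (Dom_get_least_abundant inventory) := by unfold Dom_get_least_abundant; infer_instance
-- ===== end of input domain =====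

-- B replaces A's first-key seed + strict-< min scan by a stable sort on quantity
-- followed by taking the first element (same value; objective: simpler).

-- ===== PORT A =====
def get_least_abundant (inventory : List (String × Int)) : String × Int :=
  let d := PySem.Dict.mk inventory
  let first_item := PySem.List.pyGetD d.keys 0 ""      -- list(inventory.keys())[0]; IndexError on empty dict, excluded by Pre_
  let least_name := first_item
  let least_quantity := d.getD first_item 0
  d.keys.foldl
    (fun (acc : String × Int) item_name =>
      if d.getD item_name 0 < acc.2 then (item_name, d.getD item_name 0) else acc)
    (least_name, least_quantity)

-- ===== PORT B =====
def get_least_abundant_alt (inventory : List (String × Int)) : String × Int :=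
  PySem.List.pyGetD (PySem.List.sorted inventory (fun kv => kv.2)) 0 ("", 0)   -- sorted(items, key=snd)[0]; [0] raises on empty, excluded by Pre_

-- ===== PRECONDITION & SPEC =====
-- Pre_ excludes the empty inventory, where A's list(inventory.keys())[0] raises IndexError
-- (B's [0] raises there too), and association lists with duplicate keys, which do not
-- represent a Python dict (dict keys are unique), so A is never run on them.
def Pre_get_least_abundant (inventory : List (String × Int)) : Prop :=
  inventory ≠ [] ∧ (inventory.map Prod.fst).Nodup
instance (inventory : List (String × Int)) : Decidable (Pre_get_least_abundant inventory) := by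
  unfold Pre_get_least_abundant; infer_instance
def pvWitness_get_least_abundant : (List (String × Int)) := [("apple", 3), ("banana", 1)]

def Spec_get_least_abundant (inventory : List (String × Int)) (out : String × Int) : Prop := out = get_least_abundant_alt inventory
instance (inventory : List (String × Int)) (out : String × Int) : Decidable (Spec_get_least_abundant inventory out) := by unfold Spec_get_least_abundant; infer_instance

-- ===== CLAIM (what is proved, stated in full; the proofs are below) =====
def Claim_equal_get_least_abundant : Prop := ∀ (inventory : List (String × Int)), Dom_get_least_abundant inventory → Pre_get_least_abundant inventory → Spec_get_least_abundant inventory (get_least_abundant inventory)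

-- ===== LEMMAS AND PROOFS =====

-- Under unique keys, the dict lookup of a pair's key returns that pair's value.
theorem pv_getD_of_mem (inventory : List (String × Int)) (kv : String × Int)
    (hnd : (inventory.map Prod.fst).Nodup) (hm : kv ∈ inventory) :
    (PySem.Dict.mk inventory).getD kv.1 0 = kv.2 := by
  induction inventory with
  | nil => cases hm
  | cons hd tl ih =>
    simp only [List.map_cons, List.nodup_cons] at hnd
    rcases List.mem_cons.mp hm with h | h
    · subst h
      simp only [PySem.Dict.getD]
      rw [PySem.Dict.get?_mk_cons]
      simp
    · have hne : ¬ (hd.1 == kv.1) = true := by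
        intro hb
        have heq : hd.1 = kv.1 := by simpa using hb
        exact hnd.1 (heq ▸ List.mem_map_of_mem (f := Prod.fst) h)
      simp only [PySem.Dict.getD] at *
      rw [PySem.Dict.get?_mk_cons]
      simp only [hne]
      exact ih hnd.2 h

-- The head of insertion-sorting more elements onto a nonempty accumulator is the
-- strict-< first-wins running minimum of the new elements against the head.
theorem pv_head_foldl_insertBy (xs : List (String × Int)) :
    ∀ (a : String × Int) (t : List (String × Int)) (d : String × Int),
    ((xs.foldl (fun acc x => PySem.List.insertBy (fun p q => decide (p.2 < q.2)) x acc) (a :: t)).getD 0 d)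
      = xs.foldl (fun m x => if x.2 < m.2 then x else m) a := by
  induction xs with
  | nil => intro a t d; rfl
  | cons y ys ih =>
    intro a t d
    simp only [List.foldl_cons]
    by_cases h : y.2 < a.2
    · have : PySem.List.insertBy (fun p q => decide (p.2 < q.2)) y (a :: t) = y :: a :: t := by
        simp [PySem.List.insertBy, h]
      rw [this, ih y (a :: t) d, if_pos h]
    · have : PySem.List.insertBy (fun p q => decide (p.2 < q.2)) y (a :: t)
          = a :: PySem.List.insertBy (fun p q => decide (p.2 < q.2)) y t := by
        simp [PySem.List.insertBy, h]
      rw [this, ih a _ d, if_neg h]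

-- ===== VERDICT (by name: the statement is the Claim_ definition above) =====
theorem get_least_abundant_spec : Claim_equal_get_least_abundant := by
  intro inventory _hdom hpre
  obtain ⟨hne, hnd⟩ := hpre
  obtain ⟨kv0, rest, rfl⟩ := List.exists_cons_of_ne_nil hne
  unfold Spec_get_least_abundant get_least_abundant get_least_abundant_alt
  -- B side: sorted = foldl insertBy, peel the first element, read off the head
  rw [PySem.List.sorted_eq_foldl_insertBy, PySem.List.pyGetD_zero]
  have hB : ((kv0 :: rest).foldl
        (fun acc x => PySem.List.insertBy (fun p q => decide (p.2 < q.2)) x acc) []).getD 0 ("", 0)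
      = rest.foldl (fun m x => if x.2 < m.2 then x else m) kv0 := by
    simp only [List.foldl_cons]
    have h0 : PySem.List.insertBy (fun p q : String × Int => decide (p.2 < q.2)) kv0 [] = [kv0] := rfl
    rw [h0]
    exact pv_head_foldl_insertBy rest kv0 [] ("", 0)
  rw [hB]
  -- A side: keys = map fst, each lookup returns the pair's own value
  have hkeys : (PySem.Dict.mk (kv0 :: rest)).keys = (kv0 :: rest).map Prod.fst := rfl
  simp only [hkeys, List.foldl_map]
  have hstep : ∀ (acc : String × Int) (kv : String × Int), kv ∈ kv0 :: rest →
      (if (PySem.Dict.mk (kv0 :: rest)).getD kv.1 0 < acc.2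
         then (kv.1, (PySem.Dict.mk (kv0 :: rest)).getD kv.1 0) else acc)
        = (if kv.2 < acc.2 then kv else acc) := by
    intro acc kv hm
    rw [pv_getD_of_mem _ _ hnd hm]
  rw [PySem.List.foldl_congr_mem _ _ _ _ hstep]
  -- the seed: first key's lookup is kv0.2, and folding kv0 over itself is a no-op
  have h0 : PySem.List.pyGetD ((kv0 :: rest).map Prod.fst) 0 "" = kv0.1 := by
    simp [PySem.List.pyGetD_zero]
  rw [h0, pv_getD_of_mem _ _ hnd (List.mem_cons_self ..)]
  simp only [List.foldl_cons, lt_self_iff_false, if_false]
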